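-- pv_equiv track=rewrite | github.com/aviswerdlow/k4 | 07_TOOLS/L17/run_l17_map_unknowns.py | create_text_grid
-- ===== SOURCE A (Python) =====
-- def create_text_grid(unknown_positions):
--     """Create a simple text grid showing known/unknown positions"""
--     lines = []
--     for row in range(10):
--         if row == 9:
--             # Last row has 7 positions
--             positions = range(row * 10, 97)
--         else:
--             positions = range(row * 10, (row + 1) * 10)
--
--         row_chars = []
--         for idx in positions:
--             if idx in unknown_positions:
--                 row_chars.append('?')
--             else:
--                 row_chars.append('.')
--
--         lines.append(f"{row*10:2d}: " + ' '.join(row_chars))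
--
--     return '\n'.join(lines)
-- ===== SOURCE B (Python) =====
-- def create_text_grid(unknown_positions):
--     """Create a simple text grid showing known/unknown positions"""
--     marks = ['.'] * 97
--     for p in unknown_positions:
--         if 0 <= p < 97:
--             marks[p] = '?'
--     return '\n'.join(f"{r*10:2d}: " + ' '.join(marks[r*10:(r+1)*10])
--                      for r in range(10))
-- ===== Notes on version B (the rewrite author's own statement) =====
-- stated objective: alternative
-- what changed: Inverts the traversal: instead of 97 membership scans of unknown_positions (one per cell, with a row==9 boundary branch), B preallocates a 97-cell '.' array, makes one pass over unknown_positions writing '?' at each in-range position, then formats rows by slicing; the inner membership scan disappears.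
import Mathlib
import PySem

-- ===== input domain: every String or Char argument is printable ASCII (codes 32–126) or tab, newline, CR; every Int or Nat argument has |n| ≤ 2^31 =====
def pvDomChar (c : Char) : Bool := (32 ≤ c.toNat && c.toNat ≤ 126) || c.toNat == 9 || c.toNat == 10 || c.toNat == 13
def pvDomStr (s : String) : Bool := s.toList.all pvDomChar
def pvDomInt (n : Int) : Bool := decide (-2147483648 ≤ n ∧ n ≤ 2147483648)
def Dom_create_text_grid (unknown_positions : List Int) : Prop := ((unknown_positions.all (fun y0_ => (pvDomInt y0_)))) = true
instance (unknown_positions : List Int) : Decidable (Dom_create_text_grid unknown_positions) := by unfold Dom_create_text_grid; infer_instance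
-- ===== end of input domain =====

-- B inverts the traversal: instead of a membership scan of unknown_positions for each of the 97 cells
-- (with a row==9 boundary branch), it writes '?' once per in-range unknown position into a
-- preallocated '.' array and formats rows by slicing (objective: alternative; return values proved identical).

-- shared formatting helper: f"{n:2d}" = str(n) right-aligned to width 2 with spaces
-- (hand-ported; exact for every int)
def pvFmt2 (n : Int) : String :=
  let s := PySem.Int.toStr n
  if PySem.Str.len s < 2 then " " ++ s else s

-- ===== PORT A =====
def create_text_grid (unknown_positions : List Int) : String :=
  let lines := (PySem.List.pyRange 0 10 1).foldl (fun lines row =>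
    let positions :=
      if row == 9 then PySem.List.pyRange (row * 10) 97 1
      else PySem.List.pyRange (row * 10) ((row + 1) * 10) 1
    let row_chars := positions.foldl (fun rc idx =>
      rc ++ [if unknown_positions.contains idx then "?" else "."]) ([] : List String)
    lines ++ [pvFmt2 (row * 10) ++ ": " ++ PySem.Str.join " " row_chars]) ([] : List String)
  PySem.Str.join "\n" lines

-- ===== PORT B =====
def create_text_grid_alt (unknown_positions : List Int) : String :=
  let marks := unknown_positions.foldl
    (fun m p => if 0 ≤ p ∧ p < 97 then m.set p.toNat "?" else m)
    (List.replicate 97 ".")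
  PySem.Str.join "\n" ((PySem.List.pyRange 0 10 1).map (fun r =>
    pvFmt2 (r * 10) ++ ": " ++
      PySem.Str.join " " (PySem.List.slice marks (some (r * 10)) (some ((r + 1) * 10)))))

-- ===== PRECONDITION & SPEC =====
def Spec_create_text_grid (unknown_positions : List Int) (out : String) : Prop := out = create_text_grid_alt unknown_positions
instance (unknown_positions : List Int) (out : String) : Decidable (Spec_create_text_grid unknown_positions out) := by unfold Spec_create_text_grid; infer_instance

-- ===== CLAIM (what is proved, stated in full; the proofs are below) =====
def Claim_equal_create_text_grid : Prop := ∀ (unknown_positions : List Int), Dom_create_text_grid unknown_positions → Spec_create_text_grid unknown_positions (create_text_grid unknown_positions)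

-- ===== LEMMAS AND PROOFS =====

def pvStep (m : List String) (p : Int) : List String :=
  if 0 ≤ p ∧ p < 97 then m.set p.toNat "?" else m

theorem pvStep_length (m : List String) (p : Int) : (pvStep m p).length = m.length := by
  unfold pvStep; split <;> simp

theorem pvFold_length (u : List Int) (m : List String) :
    (u.foldl pvStep m).length = m.length := by
  induction u generalizing m with
  | nil => rfl
  | cons p u ih => simp [List.foldl, ih, pvStep_length]

theorem pvFold_get (u : List Int) (m : List String) (hm : m.length = 97)
    (i : Nat) (hi : i < 97) :
    (u.foldl pvStep m)[i]? = if u.contains (i : Int) then some "?" else m[i]? := by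
  induction u generalizing m with
  | nil => simp
  | cons p u ih =>
    simp only [List.foldl_cons]
    rw [ih (pvStep m p) (by rw [pvStep_length, hm])]
    by_cases hpi : p = (i : Int)
    · subst hpi
      have hset : (pvStep m ((i : Int)))[i]? = some "?" := by
        unfold pvStep
        rw [if_pos ⟨Int.natCast_nonneg i, by exact_mod_cast hi⟩]
        simp [hm, hi, Int.toNat_natCast]
      have hcons : (((i : Int) :: u).contains ((i : Int))) = true := by simp
      rw [hcons, if_pos rfl]
      split_ifs with h
      · rfl
      · exact hset
    · have hstep : (pvStep m p)[i]? = m[i]? := by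
        unfold pvStep; split
        · rename_i h
          have hne : p.toNat ≠ i := by omega
          simp [hne]
        · rfl
      have hcons : ((p :: u).contains (i : Int)) = u.contains (i : Int) := by
        have hb : (((i : Int)) == p) = false := by
          simp only [beq_eq_false_iff_ne]
          exact fun h => hpi h.symm
        simp only [List.contains_cons, hb, Bool.false_or]
      rw [hcons, hstep]

theorem pvMarks_eq (u : List Int) :
    u.foldl pvStep (List.replicate 97 ".") =
      (List.range 97).map (fun i : Nat => if u.contains ((i : Int)) then "?" else ".") := by
  apply List.ext_getElem?
  intro i
  by_cases hi : i < 97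
  · rw [pvFold_get u _ (by simp) i hi, List.getElem?_map, List.getElem?_range hi,
        List.getElem?_replicate, if_pos hi]
    exact (apply_ite some _ _ _).symm
  · rw [List.getElem?_eq_none (by rw [pvFold_length]; simp; omega),
        List.getElem?_eq_none (by simp; omega)]

set_option maxRecDepth 8000 in
theorem create_text_grid_eq_alt (u : List Int) : create_text_grid u = create_text_grid_alt u := by
  have h0 : PySem.List.pyRange 0 10 1 = [0,1,2,3,4,5,6,7,8,9] := by decide
  have h1 : PySem.List.pyRange 10 20 1 = [10,11,12,13,14,15,16,17,18,19] := by decide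
  have h2 : PySem.List.pyRange 20 30 1 = [20,21,22,23,24,25,26,27,28,29] := by decide
  have h3 : PySem.List.pyRange 30 40 1 = [30,31,32,33,34,35,36,37,38,39] := by decide
  have h4 : PySem.List.pyRange 40 50 1 = [40,41,42,43,44,45,46,47,48,49] := by decide
  have h5 : PySem.List.pyRange 50 60 1 = [50,51,52,53,54,55,56,57,58,59] := by decide
  have h6 : PySem.List.pyRange 60 70 1 = [60,61,62,63,64,65,66,67,68,69] := by decide
  have h7 : PySem.List.pyRange 70 80 1 = [70,71,72,73,74,75,76,77,78,79] := by decide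
  have h8 : PySem.List.pyRange 80 90 1 = [80,81,82,83,84,85,86,87,88,89] := by decide
  have h9 : PySem.List.pyRange 90 97 1 = [90,91,92,93,94,95,96] := by decide
  have hr : List.range 97 = [0,1,2,3,4,5,6,7,8,9,10,11,12,13,14,15,16,17,18,19,20,21,22,23,24,25,26,27,28,29,30,31,32,33,34,35,36,37,38,39,40,41,42,43,44,45,46,47,48,49,50,51,52,53,54,55,56,57,58,59,60,61,62,63,64,65,66,67,68,69,70,71,72,73,74,75,76,77,78,79,80,81,82,83,84,85,86,87,88,89,90,91,92,93,94,95,96] := by decide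
  have hm := pvMarks_eq u
  simp only [create_text_grid, create_text_grid_alt]
  rw [show (fun (m : List String) (p : Int) => if 0 ≤ p ∧ p < 97 then m.set p.toNat "?" else m) = pvStep from rfl, hm, hr]
  simp only [h0, List.foldl, List.map, List.nil_append, List.cons_append]
  norm_num [h0,h1,h2,h3,h4,h5,h6,h7,h8,h9, PySem.List.slice, PySem.List.clampIdx]
  simp

-- ===== VERDICT (by name: the statement is the Claim_ definition above) =====
theorem create_text_grid_spec : Claim_equal_create_text_grid := by
  intro u _
  unfold Spec_create_text_grid
  exact create_text_grid_eq_alt u
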